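-- pv_equiv track=rewrite | github.com/ansible/ansible | hacking/aws_config/build_iam_policy_framework.py | get_resource_arns
-- ===== SOURCE A (Python) =====
-- def get_resource_arns(aws_actions, action_dict):
--     resource_arns = {}
--     for resource_action in aws_actions:
--         resource, action = resource_action.split(':')
--         if action not in action_dict:
--             continue
--         if action_dict[action] is None:
--             resource = "*"
--         else:
--             resource = action_dict[action].replace("${Partition}", "aws")
--         if resource not in resource_arns:
--             resource_arns[resource] = []
--         resource_arns[resource].append(resource_action)
--     return resource_arns
-- ===== SOURCE B (Python) =====
-- def get_resource_arns(aws_actions, action_dict):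
--     # pass 1: key extraction -> list of (resolved_key, original_action) pairs
--     keyed = []
--     for resource_action in aws_actions:
--         _resource, action = resource_action.split(':')
--         if action in action_dict:
--             value = action_dict[action]
--             key = "*" if value is None else value.replace("${Partition}", "aws")
--             keyed.append((key, resource_action))
--     # pass 2: group by key (first-occurrence key order, original within-group order)
--     resource_arns = {}
--     for key, _ in keyed:
--         if key not in resource_arns:
--             resource_arns[key] = [ra for k, ra in keyed if k == key]
--     return resource_arns
-- ===== Notes on version B (the rewrite author's own statement) =====
-- stated objective: alternative
-- what changed: Replaces the streaming dict-append grouping with a two-phase decomposition: one pass extracts (resolved-key, action) pairs, then a grouping pass builds each key's list in one comprehension over the pair list.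
import Mathlib
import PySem

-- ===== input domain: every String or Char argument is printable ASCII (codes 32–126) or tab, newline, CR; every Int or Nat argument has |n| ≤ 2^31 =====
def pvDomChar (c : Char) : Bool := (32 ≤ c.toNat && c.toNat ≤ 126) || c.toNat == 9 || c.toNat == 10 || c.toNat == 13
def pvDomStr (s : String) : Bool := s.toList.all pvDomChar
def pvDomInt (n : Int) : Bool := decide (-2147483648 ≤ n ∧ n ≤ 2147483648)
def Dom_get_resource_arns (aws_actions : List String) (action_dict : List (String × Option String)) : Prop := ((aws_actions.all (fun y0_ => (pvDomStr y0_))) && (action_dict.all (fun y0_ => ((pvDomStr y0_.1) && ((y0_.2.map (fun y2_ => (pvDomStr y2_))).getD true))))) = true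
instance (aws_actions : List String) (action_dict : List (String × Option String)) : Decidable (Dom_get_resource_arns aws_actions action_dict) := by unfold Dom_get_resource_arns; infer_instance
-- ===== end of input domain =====

-- B regroups by a key-extraction pass followed by a per-key collection pass (alternative decomposition, same results).

-- ===== PORT A =====
-- A's loop body: resolve the action's key and append to resource_arns[key] (skip unknown actions).
def pvStepA (d : PySem.Dict String (Option String)) (acc : PySem.Dict String (List String)) (resource_action : String) : PySem.Dict String (List String) :=
  match (PySem.Str.split? resource_action ":").getD [] with
  | [_resource, action] =>
    match d.get? action with
    | none => acc                                       -- 'if action not in action_dict: continue'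
    | some v =>
      let resource := match v with
        | none => "*"
        | some s => PySem.Str.replace s "${Partition}" "aws"
      let acc := if acc.contains resource then acc else acc.insert resource []
      acc.modify resource [] (fun l => l ++ [resource_action])
  | _ => acc                                            -- unreachable under Pre_ (Python raises ValueError)

def get_resource_arns (aws_actions : List String) (action_dict : List (String × Option String)) : List (String × List String) :=
  let d := PySem.Dict.ofList action_dict
  (aws_actions.foldl (pvStepA d) PySem.Dict.empty).items

-- ===== PORT B =====
-- B's first-pass body: append the (resolved key, original action) pair (skip unknown actions).
def pvStepB (d : PySem.Dict String (Option String)) (acc : List (String × String)) (resource_action : String) : List (String × String) :=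
  match (PySem.Str.split? resource_action ":").getD [] with
  | [_resource, action] =>
    match d.get? action with
    | none => acc
    | some v =>
      acc ++ [((match v with
        | none => "*"
        | some s => PySem.Str.replace s "${Partition}" "aws"), resource_action)]
  | _ => acc                                            -- unreachable under Pre_ (Python raises ValueError)

def get_resource_arns_alt (aws_actions : List String) (action_dict : List (String × Option String)) : List (String × List String) :=
  let d := PySem.Dict.ofList action_dict
  let keyed : List (String × String) := aws_actions.foldl (pvStepB d) []
  let resource_arns : PySem.Dict String (List String) :=
    keyed.foldl (fun r p =>
      if r.contains p.1 then r
      else r.insert p.1 ((keyed.filter (fun q => q.1 == p.1)).map Prod.snd)) PySem.Dict.empty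
  resource_arns.items

-- ===== PRECONDITION & SPEC =====
-- Pre_ excludes exactly the inputs where 'resource, action = s.split(":")' raises ValueError (≠ exactly one ':').
def Pre_get_resource_arns (aws_actions : List String) (action_dict : List (String × Option String)) : Prop :=
  ∀ s ∈ aws_actions, PySem.Str.count s ":" = 1
instance (aws_actions : List String) (action_dict : List (String × Option String)) : Decidable (Pre_get_resource_arns aws_actions action_dict) := by unfold Pre_get_resource_arns; infer_instance
def pvWitness_get_resource_arns : List String × (List (String × Option String)) :=
  (["ec2:Get", "s3:Put", "s3:Get"], [("Get", some "arn:${Partition}:thing"), ("Put", none)])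
def Spec_get_resource_arns (aws_actions : List String) (action_dict : List (String × Option String)) (out : List (String × List String)) : Prop := out = get_resource_arns_alt aws_actions action_dict
instance (aws_actions : List String) (action_dict : List (String × Option String)) (out : List (String × List String)) : Decidable (Spec_get_resource_arns aws_actions action_dict out) := by unfold Spec_get_resource_arns; infer_instance

-- ===== CLAIM (what is proved, stated in full; the proofs are below) =====
def Claim_equal_get_resource_arns : Prop := ∀ (aws_actions : List String) (action_dict : List (String × Option String)), Dom_get_resource_arns aws_actions action_dict → Pre_get_resource_arns aws_actions action_dict → Spec_get_resource_arns aws_actions action_dict (get_resource_arns aws_actions action_dict)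

-- ===== LEMMAS AND PROOFS =====

-- the shared per-element key resolution: none = skipped (no 2-part ':'-shape or action unknown)
def pvPair (d : PySem.Dict String (Option String)) (ra : String) : Option (String × String) :=
  match (PySem.Str.split? ra ":").getD [] with
  | [_resource, action] =>
    match d.get? action with
    | none => none
    | some v => some ((match v with
        | none => "*"
        | some s => PySem.Str.replace s "${Partition}" "aws"), ra)
  | _ => none

def pvPairs (d : PySem.Dict String (Option String)) (xs : List String) : List (String × String) :=
  xs.filterMap (pvPair d)

-- A's per-element step in terms of the resolved pair (the setdefault-then-append is one modify)
lemma pvStepA_pair (d : PySem.Dict String (Option String)) (acc : PySem.Dict String (List String)) (ra : String) :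
    pvStepA d acc ra = match pvPair d ra with
      | none => acc
      | some p => acc.modify p.1 [] (fun l => l ++ [p.2]) := by
  unfold pvStepA pvPair
  rcases hs : (PySem.Str.split? ra ":").getD [] with _ | ⟨a, _ | ⟨b, _ | _⟩⟩ <;> try rfl
  rcases hg : d.get? b with _ | v
  · simp [hg]
  · simp only [hg]
    set k := (match v with
      | none => "*"
      | some s => PySem.Str.replace s "${Partition}" "aws") with hk
    cases hc : acc.contains k
    · simp only [Bool.false_eq_true, if_false, PySem.Dict.modify,
        PySem.Dict.getD_insert_self, PySem.Dict.insert_insert_self,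
        PySem.Dict.getD_of_not_contains acc [] hc]
    · simp

-- B's per-element first-pass step in terms of the resolved pair
lemma pvStepB_pair (d : PySem.Dict String (Option String)) (acc : List (String × String)) (ra : String) :
    pvStepB d acc ra = match pvPair d ra with
      | none => acc
      | some p => acc ++ [p] := by
  unfold pvStepB pvPair
  rcases hs : (PySem.Str.split? ra ":").getD [] with _ | ⟨a, _ | ⟨b, _ | _⟩⟩ <;> try rfl
  rcases hg : d.get? b with _ | v <;> simp [hg]

-- A's fold over the actions is the modify-append fold over the resolved pairs
lemma pvFoldA (d : PySem.Dict String (Option String)) :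
    ∀ (xs : List String) (acc : PySem.Dict String (List String)),
    xs.foldl (pvStepA d) acc
      = (pvPairs d xs).foldl (fun r p => r.modify p.1 [] (fun l => l ++ [p.2])) acc := by
  intro xs
  induction xs with
  | nil => intro acc; rfl
  | cons x xs ih =>
    intro acc
    simp only [List.foldl_cons, pvPairs, List.filterMap_cons, pvStepA_pair]
    rcases pvPair d x with _ | p
    · exact ih acc
    · simp only [List.foldl_cons]; exact ih _

-- B's first pass accumulates exactly the resolved pairs
lemma pvFoldB (d : PySem.Dict String (Option String)) :
    ∀ (xs : List String) (acc : List (String × String)),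
    xs.foldl (pvStepB d) acc = acc ++ pvPairs d xs := by
  intro xs
  induction xs with
  | nil => intro acc; simp [pvPairs]
  | cons x xs ih =>
    intro acc
    simp only [List.foldl_cons, pvPairs, List.filterMap_cons, pvStepB_pair]
    rcases pvPair d x with _ | p
    · rw [ih]; rfl
    · simp only [List.foldl_cons]; rw [ih]; simp [pvPairs]

-- canonical grouped dict: distinct keys in first-occurrence order, each with its collected values
def pvCollect (P : List (String × String)) (k : String) : List String :=
  (P.filter (fun q => q.1 == k)).map Prod.snd

def pvCanon (P : List (String × String)) (ks : List String) : PySem.Dict String (List String) :=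
  PySem.Dict.mk ((PySem.Set.ofList ks).map (fun k => (k, pvCollect P k)))

-- B's grouping pass builds the canonical dict
lemma pvGroupB (P : List (String × String)) :
    ∀ (S : List (String × String)) (ks : List String),
    S.foldl (fun r p =>
      if r.contains p.1 then r
      else r.insert p.1 ((P.filter (fun q => q.1 == p.1)).map Prod.snd)) (pvCanon P ks)
    = pvCanon P (ks ++ S.map Prod.fst) := by
  intro S
  induction S with
  | nil => intro ks; simp
  | cons p S ih =>
    intro ks
    simp only [List.foldl_cons, List.map_cons]
    have hco : (pvCanon P ks).contains p.1 = decide (p.1 ∈ PySem.Set.ofList ks) := by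
      rw [PySem.Dict.contains_eq_decide_mem_keys]
      unfold pvCanon
      simp [PySem.Dict.keys_mk]
    have hsplit : pvCanon P (ks ++ p.1 :: S.map Prod.fst)
        = pvCanon P ((ks ++ [p.1]) ++ S.map Prod.fst) := by simp
    by_cases hmem : p.1 ∈ PySem.Set.ofList ks
    · rw [if_pos (by simp [hco, hmem]), hsplit, ← ih (ks ++ [p.1])]
      have : pvCanon P (ks ++ [p.1]) = pvCanon P ks := by
        unfold pvCanon
        rw [PySem.Set.ofList_append_singleton, PySem.Set.add_of_mem hmem]
      rw [this]
    · have h1 : (pvCanon P ks).contains p.1 = false := by simp [hco, hmem]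
      rw [if_neg (by simp [h1])]
      have hins : (pvCanon P ks).insert p.1 ((P.filter (fun q => q.1 == p.1)).map Prod.snd)
          = pvCanon P (ks ++ [p.1]) := by
        apply PySem.Dict.ext
        rw [PySem.Dict.items_insert_of_not_contains _ _ h1]
        unfold pvCanon
        rw [PySem.Set.ofList_append_singleton, PySem.Set.add_of_not_mem hmem]
        simp [pvCollect]
      rw [hins, hsplit, ← ih (ks ++ [p.1])]

-- A's grouped dict has the canonical items
lemma pvGroupA (P : List (String × String)) :
    (P.foldl (fun r p => r.modify p.1 [] (fun l => l ++ [p.2])) PySem.Dict.empty).items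
    = (pvCanon P (P.map Prod.fst)).items := by
  set dA := P.foldl (fun r p => r.modify p.1 [] (fun l => l ++ [p.2])) PySem.Dict.empty with hdA
  have hkeys : dA.keys = PySem.Set.ofList (P.map Prod.fst) := by
    rw [hdA, PySem.Dict.keys_foldl_modify_key P Prod.fst [] (fun _ p l => l ++ [p.2])]
    simp [PySem.Dict.keys_empty, PySem.Set.update_nil_left]
  have hnd : dA.keys.Nodup := by rw [hkeys]; exact PySem.Set.nodup_ofList _
  have hget : ∀ c, dA.getD c [] = pvCollect P c := by
    intro c
    rw [hdA, PySem.Dict.getD_foldl_modify_append]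
    simp [pvCollect, PySem.Dict.getD_empty]
  rw [PySem.Dict.items_eq_map_keys dA hnd []]
  unfold pvCanon
  rw [hkeys]
  exact List.map_congr_left (fun k _ => by rw [hget k])

-- ===== VERDICT (by name: the statement is the Claim_ definition above) =====
theorem get_resource_arns_spec : Claim_equal_get_resource_arns := by
  intro aws_actions action_dict _ _
  unfold Spec_get_resource_arns get_resource_arns get_resource_arns_alt
  simp only [pvFoldA, pvFoldB, List.nil_append]
  rw [pvGroupA,
    show (PySem.Dict.empty : PySem.Dict String (List String))
      = pvCanon (pvPairs (PySem.Dict.ofList action_dict) aws_actions) [] from rfl,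
    pvGroupB]
  simp
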